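-- pv_equiv track=rewrite | github.com/moocstudent/python-demo1 | DoorsInTheSchoolTest.py | doors
-- ===== SOURCE A (Python) =====
-- def doors(n):
--   # 声明doors的初始化都为closed
--   allDoors = []
--   for i in range(0, n):
--     allDoors.append("closed")
--   # 声明第一名到最后一名学生的学号number，也就是门该按什么区间来进行状态变更
--   for kid in range(1, n+1):
--     # 因为更改门状态时，学号越大的学生，只更改equal或bigThan学号的门
--     # 这里将内层range的初始使用kid-1，即对应了这个第一个应该被该学生修改状态的门
--     # 而门有n个循环到n，步进则使用kid，即每按该学生学号进行门状态更改
--     # 下面的if else都是对门的状态的变更，如果当时是关闭则打开，打开则关闭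
--     for door in range(kid-1, n, kid):
--         if allDoors[door] == "closed":
--           allDoors[door] = "open"
--         else:
--           allDoors[door] = "closed"
--
--   count = 0
--   # 计算门状态为open的门的数量
--   for j in range(0, len(allDoors)):
--     if allDoors[j] == "open":
--       count+=1
--   return count
-- ===== SOURCE B (Python) =====
-- def doors(n):
--     # A door ends open iff its number has an odd divisor count, i.e. is a
--     # perfect square; so the answer is the number of positive integers k with k*k <= n.
--     count = 0
--     k = 1
--     while k * k <= n:
--         count += 1
--         k += 1
--     return count
-- ===== Notes on version B (the rewrite author's own statement) =====
-- stated objective: faster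
-- what changed: B replaces A's full simulation (build n doors, toggle every kid-th door for each kid, then count the open ones) by counting the positive integers k with k*k <= n, since a door ends open exactly when its number is a perfect square.
import Mathlib
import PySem

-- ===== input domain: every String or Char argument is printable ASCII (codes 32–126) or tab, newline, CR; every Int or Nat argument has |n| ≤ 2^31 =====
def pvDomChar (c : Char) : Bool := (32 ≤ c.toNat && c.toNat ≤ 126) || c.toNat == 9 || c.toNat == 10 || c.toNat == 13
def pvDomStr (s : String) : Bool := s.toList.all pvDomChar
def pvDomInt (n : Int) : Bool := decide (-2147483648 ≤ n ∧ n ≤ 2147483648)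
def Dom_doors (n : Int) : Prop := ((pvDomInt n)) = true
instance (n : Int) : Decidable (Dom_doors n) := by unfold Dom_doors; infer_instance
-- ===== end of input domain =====

-- B replaces A's simulation of n toggle passes over n doors by counting the k ≥ 1 with
-- k*k ≤ n (a door stays open iff its number is a perfect square); objective: faster.

-- ===== PORT A =====
-- loop body of A's inner 'for door in range(kid-1, n, kid)' (door is always a valid index there,
-- so 'allDoors[door]' is ported by pyGetD/set exactly)
def pvFlipStep (ds : List String) (door : Int) : List String :=
  if PySem.List.pyGetD ds door "" = "closed" then ds.set door.toNat "open"
  else ds.set door.toNat "closed"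

def doors (n : Int) : Int :=
  let d0 := (PySem.List.pyRange 0 n 1).foldl (fun ds _ => ds ++ ["closed"]) ([] : List String)
  let d1 := (PySem.List.pyRange 1 (n + 1) 1).foldl
      (fun ds kid => (PySem.List.pyRange (kid - 1) n kid).foldl pvFlipStep ds) d0
  (PySem.List.pyRange 0 (PySem.List.len d1) 1).foldl
      (fun c j => if PySem.List.pyGetD d1 j "" = "open" then c + 1 else c) 0

-- ===== PORT B =====
-- 'while k*k <= n: count += 1; k += 1'
def doorsAltGo (n k count : Int) : Int :=
  if k * k ≤ n then doorsAltGo n (k + 1) (count + 1) else count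
termination_by (n + 1 - k).toNat
decreasing_by
  rename_i h
  have h1 : k ≤ n := by nlinarith [sq_nonneg (2 * k - 1)]
  omega

def doors_alt (n : Int) : Int := doorsAltGo n 1 0

-- ===== PRECONDITION & SPEC =====
def Spec_doors (n : Int) (out : Int) : Prop := out = doors_alt n
instance (n : Int) (out : Int) : Decidable (Spec_doors n out) := by unfold Spec_doors; infer_instance

-- ===== CLAIM (what is proved, stated in full; the proofs are below) =====
def Claim_equal_doors : Prop := ∀ (n : Int), Dom_doors n → Spec_doors n (doors n)

-- ===== LEMMAS AND PROOFS =====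

-- flip of a door state
def pvFlip (s : String) : String := if s = "closed" then "open" else "closed"

-- number of divisors of i+1 that lie in [1, m]
def pvDivCnt (m i : Nat) : Nat := ((Finset.Icc 1 m).filter (fun k => k ∣ (i + 1))).card

-- door states after toggle passes for kids 1..m on N doors
def pvState (N m : Nat) : List String :=
  (List.range N).map (fun i => if Odd (pvDivCnt m i) then "open" else "closed")

lemma pvState_length (N m : Nat) : (pvState N m).length = N := by
  simp [pvState]

lemma pvState_getD (N m i : Nat) (h : i < N) :
    (pvState N m).getD i "" = if Odd (pvDivCnt m i) then "open" else "closed" := by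
  simp [pvState, List.getD_eq_getElem?_getD, h]

lemma pvState_zero (N : Nat) : pvState N 0 = List.replicate N "closed" := by
  simp [pvState, pvDivCnt]

lemma init_fold (n : Int) :
    (PySem.List.pyRange 0 n 1).foldl (fun ds _ => ds ++ ["closed"]) ([] : List String)
      = List.replicate n.toNat "closed" := by
  rw [PySem.List.foldl_append_singleton_eq_map (f := fun _ => "closed")]
  simp [List.map_const', PySem.List.length_pyRange_one]

lemma nodup_pyRange_pos (a b s : Int) (hs : 0 < s) : (PySem.List.pyRange a b s).Nodup := by
  rw [PySem.List.pyRange_of_pos a b hs]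
  refine List.Nodup.map ?_ (List.nodup_range)
  intro x y hxy
  simp only [add_right_inj] at hxy
  have := mul_left_cancel₀ (ne_of_gt hs) hxy
  exact_mod_cast this

lemma flipStep_eq (ds : List String) (d : Int) (hd : 0 ≤ d) :
    pvFlipStep ds d = ds.set d.toNat (pvFlip (ds.getD d.toNat "")) := by
  rw [pvFlipStep, pvFlip, PySem.List.pyGetD_of_nonneg ds "" hd]
  split_ifs <;> rfl

lemma toggle_fold (L : List Int) (ds : List String) (hnd : L.Nodup)
    (hb : ∀ d ∈ L, 0 ≤ d ∧ d.toNat < ds.length) :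
    (L.foldl pvFlipStep ds).length = ds.length ∧
    ∀ i : Nat, i < ds.length →
      (L.foldl pvFlipStep ds).getD i "" =
        if (i : Int) ∈ L then pvFlip (ds.getD i "") else ds.getD i "" := by
  induction L generalizing ds with
  | nil => simp
  | cons d L' ih =>
    obtain ⟨hd0, hdlt⟩ := hb d (by simp)
    have hstep : pvFlipStep ds d = ds.set d.toNat (pvFlip (ds.getD d.toNat "")) :=
      flipStep_eq ds d hd0
    have hlen : (pvFlipStep ds d).length = ds.length := by rw [hstep]; simp
    obtain ⟨ihlen, ihget⟩ := ih (pvFlipStep ds d) hnd.of_cons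
      (fun e he => by rw [hlen]; exact hb e (List.mem_cons_of_mem _ he))
    refine ⟨by simpa [List.foldl_cons, hlen] using ihlen, ?_⟩
    intro i hi
    rw [List.foldl_cons, ihget i (by omega)]
    have hàget : ∀ j : Nat, j < ds.length → (pvFlipStep ds d).getD j "" =
        if j = d.toNat then pvFlip (ds.getD j "") else ds.getD j "" := by
      intro j hj
      rw [hstep]
      by_cases hji : j = d.toNat
      · subst hji
        simp [List.getD_eq_getElem?_getD, hj]
      · rw [if_neg hji]
        simp only [List.getD_eq_getElem?_getD]
        rw [List.getElem?_set_ne (by omega : d.toNat ≠ j)]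
    by_cases hiL : (i : Int) ∈ L'
    · have hne : (i : Int) ≠ d := by
        intro he
        exact (List.nodup_cons.mp hnd).1 (he ▸ hiL)
      rw [if_pos hiL, if_pos (List.mem_cons_of_mem d hiL), hàget i hi,
          if_neg (by omega : ¬ i = d.toNat)]
    · rw [if_neg hiL, hàget i hi]
      by_cases hid : (i : Int) = d
      · rw [if_pos (by omega : i = d.toNat), if_pos (by rw [hid]; exact List.mem_cons_self)]
      · rw [if_neg (by omega : ¬ i = d.toNat),
            if_neg (by simp only [List.mem_cons]; push Not; exact ⟨hid, hiL⟩)]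

lemma mem_inner_range (N : Nat) (kid : Int) (hk : 1 ≤ kid) (i : Nat) :
    ((i : Int) ∈ PySem.List.pyRange (kid - 1) (N : Int) kid) ↔ (kid ∣ (i : Int) + 1 ∧ i < N) := by
  rw [PySem.List.mem_pyRange_iff_of_pos (by omega)]
  have he : (i : Int) - (kid - 1) = ((i : Int) + 1) - kid := by ring
  constructor
  · rintro ⟨h1, h2, h3⟩
    rw [he] at h3
    have : kid ∣ (i : Int) + 1 := by simpa using h3.add (dvd_refl kid)
    exact ⟨this, by omega⟩
  · rintro ⟨h1, h2⟩
    have hle : kid ≤ (i : Int) + 1 := Int.le_of_dvd (by omega) h1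
    exact ⟨by omega, by omega, by rw [he]; exact h1.sub (dvd_refl kid)⟩

lemma inner_bounds (N : Nat) (kid : Int) (hk : 1 ≤ kid) :
    ∀ d ∈ PySem.List.pyRange (kid - 1) (N : Int) kid, 0 ≤ d ∧ d.toNat < N := by
  intro d hd
  rw [PySem.List.mem_pyRange_iff_of_pos (by omega)] at hd
  omega

lemma pvDivCnt_succ (m i : Nat) :
    pvDivCnt (m + 1) i = pvDivCnt m i + (if (m + 1) ∣ (i + 1) then 1 else 0) := by
  unfold pvDivCnt
  have h : Finset.Icc 1 (m + 1) = insert (m + 1) (Finset.Icc 1 m) := by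
    ext x; simp [Finset.mem_Icc, Finset.mem_insert]; omega
  rw [h, Finset.filter_insert]
  split_ifs with hd
  · rw [Finset.card_insert_of_notMem (by simp [Finset.mem_Icc])]
  · rfl

lemma outer_step (N m : Nat) :
    (PySem.List.pyRange ((m : Int) + 1 - 1) (N : Int) ((m : Int) + 1)).foldl pvFlipStep (pvState N m)
      = pvState N (m + 1) := by
  have hb : ∀ d ∈ PySem.List.pyRange ((m : Int) + 1 - 1) (N : Int) ((m : Int) + 1),
      0 ≤ d ∧ d.toNat < (pvState N m).length := by
    rw [pvState_length]
    exact inner_bounds N ((m : Int) + 1) (by omega)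
  obtain ⟨hlen, hget⟩ := toggle_fold _ (pvState N m)
    (nodup_pyRange_pos _ _ _ (by omega)) hb
  apply List.ext_getElem (by rw [hlen, pvState_length, pvState_length])
  intro i h1 h2
  rw [← List.getD_eq_getElem _ "" h1, ← List.getD_eq_getElem _ "" h2]
  have hiN : i < N := by rwa [pvState_length] at h2
  rw [hget i (by rwa [pvState_length])]
  simp only [mem_inner_range N ((m : Int) + 1) (by omega) i]
  rw [pvState_getD N m i hiN, pvState_getD N (m + 1) i hiN, pvDivCnt_succ]
  have hdvd : ((m : Int) + 1 ∣ (i : Int) + 1) ↔ ((m + 1) ∣ (i + 1)) := by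
    constructor
    · intro h
      exact_mod_cast Int.natCast_dvd_natCast.mpr (by exact_mod_cast h)
    · intro h
      exact_mod_cast Int.natCast_dvd_natCast.mpr h
  by_cases hd : (m + 1) ∣ (i + 1)
  · rw [if_pos ⟨hdvd.mpr hd, hiN⟩, if_pos hd]
    rcases Nat.even_or_odd (pvDivCnt m i) with he | ho
    · rw [if_neg (by simpa using he), if_pos (by simpa [Nat.odd_add_one] using he)]
      rfl
    · rw [if_pos ho, if_neg (by simp [Nat.odd_add_one, ho])]
      rfl
  · rw [if_neg (fun hc => hd (hdvd.mp hc.1)), if_neg hd]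
    simp

lemma outer_fold (N m : Nat) :
    (PySem.List.pyRange 1 ((m : Int) + 1) 1).foldl
        (fun ds kid => (PySem.List.pyRange (kid - 1) (N : Int) kid).foldl pvFlipStep ds)
        (pvState N 0)
      = pvState N m := by
  induction m with
  | zero => rw [PySem.List.pyRange_one_eq_nil (by omega)]; rfl
  | succ m ih =>
    have hcast : ((m + 1 : Nat) : Int) + 1 = ((m : Int) + 1) + 1 := by push_cast; ring
    rw [hcast, PySem.List.pyRange_one_succ_right (by omega), List.foldl_append, ih]
    simpa using outer_step N m

lemma divCnt_full (N i : Nat) (h : i < N) : pvDivCnt N i = (i + 1).divisors.card := by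
  unfold pvDivCnt
  congr 1
  ext d
  simp only [Finset.mem_filter, Finset.mem_Icc, Nat.mem_divisors]
  constructor
  · rintro ⟨⟨h1, h2⟩, h3⟩
    exact ⟨h3, by omega⟩
  · rintro ⟨h1, h2⟩
    have hd1 : 1 ≤ d := Nat.pos_of_dvd_of_pos h1 (by omega)
    have hd2 : d ≤ i + 1 := Nat.le_of_dvd (by omega) h1
    exact ⟨⟨hd1, by omega⟩, h1⟩

lemma odd_divisors_iff_square (m : Nat) (hm : 1 ≤ m) :
    Odd m.divisors.card ↔ Nat.sqrt m * Nat.sqrt m = m := by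
  have hm0 : m ≠ 0 := by omega
  have hsplit1 := (Finset.card_filter_add_card_filter_not (s := m.divisors) (fun d => d * d < m)).symm
  have he1 : (m.divisors.filter (fun d => ¬ d * d < m)).filter (fun d => d * d = m)
      = m.divisors.filter (fun d => d * d = m) := by
    ext d; simp only [Finset.mem_filter]; constructor
    · rintro ⟨⟨h1, _⟩, h3⟩; exact ⟨h1, h3⟩
    · rintro ⟨h1, h2⟩; exact ⟨⟨h1, by omega⟩, h2⟩
  have he2 : (m.divisors.filter (fun d => ¬ d * d < m)).filter (fun d => ¬ d * d = m)
      = m.divisors.filter (fun d => m < d * d) := by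
    ext d; simp only [Finset.mem_filter]; constructor
    · rintro ⟨⟨h1, h2⟩, h3⟩; exact ⟨h1, by omega⟩
    · rintro ⟨h1, h2⟩; exact ⟨⟨h1, by omega⟩, by omega⟩
  have hsplit2 := (Finset.card_filter_add_card_filter_not
      (s := m.divisors.filter (fun d => ¬ d * d < m)) (fun d => d * d = m)).symm
  rw [he1, he2] at hsplit2
  have hAB : (m.divisors.filter (fun d => d * d < m)).card = (m.divisors.filter (fun d => m < d * d)).card := by
    apply Finset.card_nbij (fun d => m / d)
    · intro d hd
      simp only [Finset.mem_coe, Finset.mem_filter, Nat.mem_divisors] at hd ⊢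
      obtain ⟨⟨hdvd, _⟩, hlt⟩ := hd
      have hdpos : 0 < d := Nat.pos_of_dvd_of_pos hdvd (by omega)
      have hq : d * (m / d) = m := Nat.mul_div_cancel' hdvd
      have hqdvd : m / d ∣ m := Nat.div_dvd_of_dvd hdvd
      have hdq : d < m / d := by
        by_contra hc
        push Not at hc
        have := Nat.mul_le_mul_left d hc
        omega
      refine ⟨⟨hqdvd, hm0⟩, ?_⟩
      calc m = d * (m / d) := hq.symm
        _ < (m / d) * (m / d) := by
            apply Nat.mul_lt_mul_of_lt_of_le hdq le_rfl
            omega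
    · intro d1 h1 d2 h2 heq
      simp only [Finset.mem_coe, Finset.mem_filter, Nat.mem_divisors] at h1 h2
      have e1 : m / (m / d1) = d1 := Nat.div_div_self h1.1.1 hm0
      have e2 : m / (m / d2) = d2 := Nat.div_div_self h2.1.1 hm0
      simp only at heq
      rw [← e1, ← e2, heq]
    · intro b hb
      simp only [Finset.mem_coe, Finset.mem_filter, Nat.mem_divisors] at hb
      obtain ⟨⟨hdvd, _⟩, hlt⟩ := hb
      have hbpos : 0 < b := Nat.pos_of_dvd_of_pos hdvd (by omega)
      have hq : b * (m / b) = m := Nat.mul_div_cancel' hdvd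
      have hepos : 0 < m / b := by
        rcases Nat.eq_zero_or_pos (m / b) with h | h
        · rw [h] at hq; omega
        · exact h
      have heb : m / b < b := by
        by_contra hc
        push Not at hc
        have := Nat.mul_le_mul_left b hc
        omega
      refine ⟨m / b, ?_, Nat.div_div_self hdvd hm0⟩
      simp only [Finset.mem_coe, Finset.mem_filter, Nat.mem_divisors]
      refine ⟨⟨Nat.div_dvd_of_dvd hdvd, hm0⟩, ?_⟩
      calc m / b * (m / b) < b * (m / b) := by
            apply Nat.mul_lt_mul_of_lt_of_le heb le_rfl hepos
        _ = m := hq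
  have hF : (m.divisors.filter (fun d => d * d = m)).card
      = if Nat.sqrt m * Nat.sqrt m = m then 1 else 0 := by
    split_ifs with h
    · have : m.divisors.filter (fun d => d * d = m) = {Nat.sqrt m} := by
        ext d
        simp only [Finset.mem_filter, Nat.mem_divisors, Finset.mem_singleton]
        constructor
        · rintro ⟨_, hdd⟩
          rw [← hdd, Nat.sqrt_eq]
        · rintro rfl
          exact ⟨⟨⟨Nat.sqrt m, h.symm⟩, hm0⟩, h⟩
      rw [this, Finset.card_singleton]
    · have : m.divisors.filter (fun d => d * d = m) = ∅ := by
        ext d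
        simp only [Finset.mem_filter, Nat.mem_divisors, Finset.notMem_empty, iff_false]
        rintro ⟨_, hdd⟩
        exact h (by rw [← hdd, Nat.sqrt_eq, hdd])
      rw [this, Finset.card_empty]
  rw [Nat.odd_iff, hsplit1, hsplit2, hAB, hF]
  split_ifs with h
  · simp only [h, iff_true]
    omega
  · simp only [h, iff_false]
    omega

lemma count_squares (N : Nat) :
    (List.range N).countP (fun i => decide (Nat.sqrt (i + 1) * Nat.sqrt (i + 1) = i + 1))
      = Nat.sqrt N := by
  induction N with
  | zero => simp
  | succ N ih =>
    rw [List.range_succ, List.countP_append, ih]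
    simp only [List.countP_cons, List.countP_nil]
    have ht : Nat.sqrt N ≤ Nat.sqrt (N + 1) := Nat.sqrt_le_sqrt (by omega)
    have ht2 : Nat.sqrt (N + 1) ≤ Nat.sqrt N + 1 := by
      have h1 : N + 1 ≤ (Nat.sqrt N + 1) * (Nat.sqrt N + 1) := Nat.lt_succ_sqrt N
      exact Nat.sqrt_le_sqrt h1 |>.trans (le_of_eq (Nat.sqrt_eq _))
    by_cases hsq : Nat.sqrt (N + 1) * Nat.sqrt (N + 1) = N + 1
    · have hlt : Nat.sqrt N < Nat.sqrt (N + 1) := by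
        by_contra hc
        push Not at hc
        have h4 := Nat.sqrt_le N
        have h5 := Nat.mul_le_mul hc hc
        omega
      simp [hsq]
      omega
    · have heq : Nat.sqrt (N + 1) = Nat.sqrt N := by
        have h2 : Nat.sqrt (N + 1) * Nat.sqrt (N + 1) ≤ N + 1 := Nat.sqrt_le (N + 1)
        have h3 : Nat.sqrt (N + 1) * Nat.sqrt (N + 1) ≤ N := by omega
        have := Nat.le_sqrt.mpr h3
        omega
      simp [hsq]
      omega

lemma altGo_eq (n k c : Int) (hk : 1 ≤ k) :
    doorsAltGo n k c = c + max ((Nat.sqrt n.toNat : Int) - k + 1) 0 := by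
  induction k, c using doorsAltGo.induct n with
  | case1 k c h ih =>
    rw [doorsAltGo, if_pos h]
    have hn : 0 ≤ n := le_trans (by nlinarith) h
    have hks : k ≤ (Nat.sqrt n.toNat : Int) := by
      have hk' : (k.toNat : Int) = k := Int.toNat_of_nonneg (by omega)
      have hn' : (n.toNat : Int) = n := Int.toNat_of_nonneg hn
      have h2 : k.toNat * k.toNat ≤ n.toNat := by
        have h3 : (k.toNat : Int) * k.toNat ≤ (n.toNat : Int) := by rw [hk', hn']; exact h
        exact_mod_cast h3
      have := Nat.le_sqrt.mpr h2
      omega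
    rw [ih (by omega)]
    omega
  | case2 k c h =>
    rw [doorsAltGo, if_neg h]
    have hs : (Nat.sqrt n.toNat : Int) < k := by
      rcases le_or_gt 0 n with hn | hn
      · by_contra hc
        push Not at hc
        have h2 : k.toNat ≤ Nat.sqrt n.toNat := by omega
        have h5 : k.toNat * k.toNat ≤ n.toNat := Nat.le_sqrt.mp h2
        have h6 : (k.toNat : Int) * k.toNat ≤ (n.toNat : Int) := by exact_mod_cast h5
        have hkk : (k.toNat : Int) = k := by omega
        rw [hkk] at h6
        exact h (by omega)
      · have : n.toNat = 0 := by omega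
        simp [this]
        omega
    omega


lemma doors_alt_eq (n : Int) : doors_alt n = (Nat.sqrt n.toNat : Int) := by
  rw [doors_alt, altGo_eq n 1 0 le_rfl]
  have : 0 ≤ (Nat.sqrt n.toNat : Int) := Int.natCast_nonneg _
  omega

lemma doors_eq (n : Int) : doors n = (Nat.sqrt n.toNat : Int) := by
  rcases le_or_gt n 0 with hn | hn
  · have h0 : n.toNat = 0 := by omega
    rw [doors]
    simp only [PySem.List.pyRange_one_eq_nil (by omega : n ≤ 0),
      PySem.List.pyRange_one_eq_nil (by omega : n + 1 ≤ 1), List.foldl_nil]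
    rw [show PySem.List.len ([] : List String) = 0 from rfl,
      PySem.List.pyRange_one_eq_nil le_rfl, List.foldl_nil, h0]
    simp
  · set N := n.toNat with hN
    have hn' : (N : Int) = n := by omega
    rw [doors]
    simp only [← hn']
    rw [init_fold, show ((N : Int)).toNat = N by omega, ← pvState_zero, outer_fold N N]
    rw [PySem.List.len_eq, pvState_length]
    nth_rewrite 1 [show ((N : Int)) = ((pvState N N).length : Int) by rw [pvState_length]]
    rw [PySem.List.foldl_pyRange_zero_pyGetD' (pvState N N) ""
        (fun c x => if x = "open" then c + 1 else c) 0]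
    rw [PySem.List.foldl_ite_add_one (fun x => x = "open") (pvState N N) 0]
    rw [pvState]
    rw [List.countP_map]
    have hc1 : List.countP ((fun x => decide (x = "open")) ∘
        (fun i => if Odd (pvDivCnt N i) then "open" else "closed")) (List.range N)
        = List.countP (fun i => decide (Nat.sqrt (i + 1) * Nat.sqrt (i + 1) = i + 1))
            (List.range N) := by
      apply List.countP_congr
      intro i hi
      have hiN : i < N := List.mem_range.mp hi
      simp only [Function.comp_apply]
      rw [divCnt_full N i hiN]
      by_cases ho : Odd (i + 1).divisors.card
      · rw [if_pos ho]
        simp only [decide_eq_true_eq]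
        exact ⟨fun _ => (odd_divisors_iff_square (i + 1) (by omega)).mp ho, fun _ => trivial⟩
      · rw [if_neg ho]
        simp only [decide_eq_true_eq]
        constructor
        · intro h; exact absurd h (by decide)
        · intro h
          exact absurd ((odd_divisors_iff_square (i + 1) (by omega)).mpr h) ho
    rw [hc1, count_squares N]
    omega

-- ===== VERDICT (by name: the statement is the Claim_ definition above) =====
theorem doors_spec : Claim_equal_doors := by
  intro n _
  unfold Spec_doors
  rw [doors_eq, doors_alt_eq]
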